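-- pv_equiv track=rewrite | github.com/pacilo/dayeonssi | server/pytest/yunho_web_lib.py | add_slash
-- ===== SOURCE A (Python) =====
-- def add_slash(str):
-- 	#정규식으로 활용하기위해 앞에 역슬래쉬를 붙여준다
-- 	expectPattern = ['[',']','<','>','/','"','=','&']
-- 	result = ""
-- 	for c in str:
-- 		tf = False
-- 		for e in expectPattern:
-- 			if c == e:
-- 				result += '\\'+c
-- 				tf = True
-- 		if tf == False:
-- 			result +=c
-- 	return result
-- ===== SOURCE B (Python) =====
-- def add_slash(str):
-- 	#정규식으로 활용하기위해 앞에 역슬래쉬를 붙여준다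
-- 	for ch in '[]<>/"=&':
-- 		str = str.replace(ch, '\\' + ch)
-- 	return str
-- ===== Notes on version B (the rewrite author's own statement) =====
-- stated objective: simpler
-- what changed: Replaces A's per-character outer loop with an inner scan over the 8-element pattern list and a matched flag (building the result by repeated concatenation) with eight staged whole-string str.replace passes, one per special character; correct because the inserted backslash and the already-handled characters are never matched by later passes.
import Mathlib
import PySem

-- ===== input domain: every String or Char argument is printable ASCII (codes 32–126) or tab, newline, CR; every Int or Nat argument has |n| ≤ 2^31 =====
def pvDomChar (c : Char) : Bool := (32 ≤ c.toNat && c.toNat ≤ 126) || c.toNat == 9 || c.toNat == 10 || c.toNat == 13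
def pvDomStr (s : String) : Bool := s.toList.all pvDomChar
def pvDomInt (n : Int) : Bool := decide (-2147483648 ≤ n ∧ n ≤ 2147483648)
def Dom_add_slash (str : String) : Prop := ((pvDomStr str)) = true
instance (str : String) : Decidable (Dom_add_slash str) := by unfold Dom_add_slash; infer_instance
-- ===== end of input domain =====

-- B replaces A's per-character loop with an inner scan of the pattern list by eight
-- staged whole-string replace passes, one per special character; simpler.

-- ===== PORT A =====
-- one step of A's outer loop: scan the pattern list, remember in tf whether c matched
def addSlashStep (result : List Char) (c : Char) : List Char :=
  let st := (['[', ']', '<', '>', '/', '"', '=', '&']).foldl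
    (fun (p : List Char × Bool) e => if c == e then (p.1 ++ ['\\', c], true) else p)
    (result, false)
  if st.2 == false then st.1 ++ [c] else st.1

def add_slash (str : String) : String :=
  String.ofList (str.toList.foldl addSlashStep [])

-- ===== PORT B =====
-- B: for ch in '[]<>/"=&': str = str.replace(ch, '\\' + ch)
def add_slash_alt (str : String) : String :=
  ("[]<>/\"=&".toList).foldl
    (fun s ch => PySem.Str.replace s (String.ofList [ch]) (String.ofList ['\\', ch])) str

-- ===== PRECONDITION & SPEC =====
def Spec_add_slash (str : String) (out : String) : Prop := out = add_slash_alt str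
instance (str : String) (out : String) : Decidable (Spec_add_slash str out) := by unfold Spec_add_slash; infer_instance

-- ===== CLAIM (what is proved, stated in full; the proofs are below) =====
def Claim_equal_add_slash : Prop := ∀ (str : String), Dom_add_slash str → Spec_add_slash str (add_slash str)

-- ===== LEMMAS AND PROOFS =====

-- the per-character effect both programs realise
def pvMap (c : Char) : List Char :=
  if c = '[' ∨ c = ']' ∨ c = '<' ∨ c = '>' ∨ c = '/' ∨ c = '"' ∨ c = '=' ∨ c = '&'
  then ['\\', c] else [c]

-- ---- A side: the fold is the flatMap of pvMap ----
theorem pv_step_eq (acc : List Char) (c : Char) :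
    addSlashStep acc c = acc ++ pvMap c := by
  by_cases h1 : c = '[' ; · subst h1; simp [addSlashStep, pvMap]
  by_cases h2 : c = ']' ; · subst h2; simp [addSlashStep, pvMap]
  by_cases h3 : c = '<' ; · subst h3; simp [addSlashStep, pvMap]
  by_cases h4 : c = '>' ; · subst h4; simp [addSlashStep, pvMap]
  by_cases h5 : c = '/' ; · subst h5; simp [addSlashStep, pvMap]
  by_cases h6 : c = '"' ; · subst h6; simp [addSlashStep, pvMap]
  by_cases h7 : c = '=' ; · subst h7; simp [addSlashStep, pvMap]
  by_cases h8 : c = '&' ; · subst h8; simp [addSlashStep, pvMap]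
  simp [addSlashStep, pvMap, h1, h2, h3, h4, h5, h6, h7, h8]

theorem pv_foldl_eq (cs : List Char) (acc : List Char) :
    cs.foldl addSlashStep acc = acc ++ cs.flatMap pvMap := by
  induction cs generalizing acc with
  | nil => simp
  | cons c cs ih => simp [List.foldl, pv_step_eq, ih, List.append_assoc]

-- ---- B side: a single-character replace pass is a flatMap ----
theorem pv_go_single (e : Char) (new : List Char) (l acc : List Char) (fuel : Nat)
    (h : l.length ≤ fuel) :
    PySem.Chars.replace.go [e] new fuel l acc
      = acc.reverse ++ l.flatMap (fun c => if c = e then new else [c]) := by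
  induction l generalizing fuel acc with
  | nil => cases fuel <;> simp [PySem.Chars.replace.go]
  | cons c t ih =>
    cases fuel with
    | zero => simp at h
    | succ fuel =>
      simp only [PySem.Chars.replace.go]
      by_cases hc : c = e
      · subst hc
        have hp : List.isPrefixOf [c] (c :: t) = true := by
          simp [List.isPrefixOf]
        simp only [hp, if_pos, List.length_cons, List.length_nil, List.drop_succ_cons,
          List.drop_zero]
        rw [ih (fuel := fuel) (acc := new.reverse ++ acc) (by simpa using Nat.le_of_succ_le_succ h)]
        simp [List.flatMap_cons]
      · have hp : List.isPrefixOf [e] (c :: t) = false := by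
          simp [List.isPrefixOf]
          exact fun he => absurd he.symm hc
        simp only [hp, Bool.false_eq_true, if_false]
        rw [ih (fuel := fuel) (acc := c :: acc) (by simpa using Nat.le_of_succ_le_succ h)]
        simp [List.flatMap_cons, hc]

theorem pv_replace_single (e : Char) (new : List Char) (s : List Char) :
    PySem.Chars.replace s [e] new = s.flatMap (fun c => if c = e then new else [c]) := by
  simp only [PySem.Chars.replace, List.isEmpty]
  · exact pv_go_single e new s [] s.length (le_refl _)

def pvPass (e : Char) (l : List Char) : List Char :=
  l.flatMap (fun c => if c = e then ['\\', e] else [c])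

theorem pv_pass_toList (e : Char) (s : String) :
    (PySem.Str.replace s (String.ofList [e]) (String.ofList ['\\', e])).toList
      = pvPass e s.toList := by
  rw [PySem.Str.toList_replace]
  simp [pvPass, pv_replace_single]

-- composing the eight passes acts on each original character as pvMap
theorem pv_passes_char (c : Char) :
    pvPass '&' (pvPass '=' (pvPass '"' (pvPass '/' (pvPass '>' (pvPass '<'
      (pvPass ']' (pvPass '[' [c]))))))) = pvMap c := by
  by_cases h1 : c = '[' ; · subst h1; decide
  by_cases h2 : c = ']' ; · subst h2; decide
  by_cases h3 : c = '<' ; · subst h3; decide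
  by_cases h4 : c = '>' ; · subst h4; decide
  by_cases h5 : c = '/' ; · subst h5; decide
  by_cases h6 : c = '"' ; · subst h6; decide
  by_cases h7 : c = '=' ; · subst h7; decide
  by_cases h8 : c = '&' ; · subst h8; decide
  simp [pvPass, pvMap, h1, h2, h3, h4, h5, h6, h7, h8]

theorem pv_pass_flatMap (e : Char) (l : List Char) (f : Char → List Char) :
    pvPass e (l.flatMap f) = l.flatMap (fun c => pvPass e (f c)) := by
  simp [pvPass, List.flatMap_assoc]

theorem pv_chain (l : List Char) :
    pvPass '&' (pvPass '=' (pvPass '"' (pvPass '/' (pvPass '>' (pvPass '<'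
      (pvPass ']' (pvPass '[' l))))))) = l.flatMap pvMap := by
  have h : pvPass '[' l = l.flatMap (fun c => pvPass '[' [c]) := by
    conv_lhs => rw [show l = l.flatMap (fun c => [c]) by simp]
    rw [pv_pass_flatMap]
  rw [h]
  simp only [pv_pass_flatMap, pv_passes_char]

theorem pv_alt_toList (str : String) :
    (add_slash_alt str).toList = str.toList.flatMap pvMap := by
  show (List.foldl _ str _).toList = _
  rw [show ("[]<>/\"=&".toList) = ['[', ']', '<', '>', '/', '"', '=', '&'] from by decide]
  simp only [List.foldl, pv_pass_toList]
  exact pv_chain str.toList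

-- ===== VERDICT (by name: the statement is the Claim_ definition above) =====
theorem add_slash_spec : Claim_equal_add_slash := by
  intro str _
  unfold Spec_add_slash
  rw [← String.toList_inj]
  rw [pv_alt_toList]
  unfold add_slash
  rw [pv_foldl_eq, List.nil_append, String.toList_ofList]
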